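-- pv_equiv track=rewrite | github.com/hagall25/DIP | tree.py | compute_length
-- ===== SOURCE A (Python) =====
-- MODE = 1
--
-- CFG = None
--
-- def get_node_len(node_name):
--     if MODE == 1:
--         return 1
--     if MODE == 2 and CFG != None:
--         l = CFG.get_node_length(node_name)
--         if l == 0:
--             return 1
--         else:
--             return l
--     else:
--         return 1
--
-- def compute_length(chain:str):
--     if chain == '':
--         return 0
--     arr = chain.split(' ')
--     res = 0
--     for node_name in arr:
--         res += get_node_len(node_name)
--     return res
-- ===== SOURCE B (Python) =====
-- def compute_length(chain: str):
--     if chain == '':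
--         return 0
--     return chain.count(' ') + 1
-- ===== Notes on version B (the rewrite author's own statement) =====
-- stated objective: simpler
-- what changed: B replaces splitting the chain into a list and summing a per-token node length with a closed form: each token contributes 1 under MODE==1, so the result is the number of ' ' separators plus one (keeping the empty-string guard).
import Mathlib
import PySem

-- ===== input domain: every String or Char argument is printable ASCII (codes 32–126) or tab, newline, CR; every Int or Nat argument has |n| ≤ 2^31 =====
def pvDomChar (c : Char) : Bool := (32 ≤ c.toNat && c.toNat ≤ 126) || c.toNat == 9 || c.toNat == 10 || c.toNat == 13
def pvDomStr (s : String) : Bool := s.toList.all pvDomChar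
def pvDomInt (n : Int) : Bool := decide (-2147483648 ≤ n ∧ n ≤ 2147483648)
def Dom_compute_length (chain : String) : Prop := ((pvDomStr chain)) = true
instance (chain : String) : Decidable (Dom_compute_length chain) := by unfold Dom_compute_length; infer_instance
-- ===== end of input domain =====

-- B computes the token count as a closed form (spaces + 1) instead of splitting and summing per-token lengths; objective: simpler.

-- ===== PORT A =====
def pvMODE : Int := 1

-- CFG = None, so the 'MODE == 2 and CFG != None' branch of get_node_len never fires; both remaining paths return 1.
def get_node_len (_node_name : String) : Int :=
  if pvMODE = 1 then 1 else 1

def compute_length (chain : String) : Int :=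
  if chain = "" then 0
  else
    let arr := (PySem.Str.split? chain " ").getD []   -- sep " " ≠ "", so split? never returns none
    arr.foldl (fun res node_name => res + get_node_len node_name) 0

-- ===== PORT B =====
def compute_length_alt (chain : String) : Int :=
  if chain = "" then 0
  else (PySem.Str.count chain " " : Int) + 1

-- ===== PRECONDITION & SPEC =====
def Spec_compute_length (chain : String) (out : Int) : Prop := out = compute_length_alt chain
instance (chain : String) (out : Int) : Decidable (Spec_compute_length chain out) := by unfold Spec_compute_length; infer_instance

-- ===== CLAIM (what is proved, stated in full; the proofs are below) =====
def Claim_equal_compute_length : Prop := ∀ (chain : String), Dom_compute_length chain → Spec_compute_length chain (compute_length chain)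

-- ===== LEMMAS AND PROOFS =====

-- structural spec of the number of ' ' occurrences
def pvCnt : List Char → Nat
  | [] => 0
  | c :: t => (if c = ' ' then 1 else 0) + pvCnt t

theorem pvCount_go_eq (l : List Char) : ∀ (fuel acc : Nat), l.length ≤ fuel →
    PySem.Chars.count.go [' '] fuel l acc = acc + pvCnt l := by
  induction l with
  | nil => intro fuel acc _; cases fuel <;> simp [PySem.Chars.count.go, pvCnt]
  | cons c t ih =>
    intro fuel acc h
    cases fuel with
    | zero => simp at h
    | succ f =>
      have hf : t.length ≤ f := by simpa using h
      by_cases hc : c = ' '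
      · subst hc
        simp [PySem.Chars.count.go, List.isPrefixOf, ih f (acc + 1) hf, pvCnt]
        omega
      · have : [' '].isPrefixOf (c :: t) = false := by
          simp [List.isPrefixOf]; exact fun h' => hc h'.symm
        simp [PySem.Chars.count.go, this, ih f acc hf, pvCnt, hc]

theorem pvSplit_go_len (l : List Char) : ∀ (fuel : Nat) (cur : List Char) (acc : List (List Char)),
    l.length < fuel →
    (PySem.Chars.splitOn.go [' '] fuel l cur acc).length = acc.length + 1 + pvCnt l := by
  induction l with
  | nil =>
    intro fuel cur acc h
    cases fuel with
    | zero => simp at h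
    | succ f => simp [PySem.Chars.splitOn.go, pvCnt]
  | cons c t ih =>
    intro fuel cur acc h
    cases fuel with
    | zero => simp at h
    | succ f =>
      have hf : t.length < f := by simpa using h
      by_cases hc : c = ' '
      · subst hc
        simp [PySem.Chars.splitOn.go, List.isPrefixOf,
          pvCnt,
          ih f [] (cur.reverse :: acc) hf]
        omega
      · have hp : [' '].isPrefixOf (c :: t) = false := by
          simp [List.isPrefixOf]; exact fun h' => hc h'.symm
        simp [PySem.Chars.splitOn.go, hp, ih f (c :: cur) acc hf, pvCnt, hc]

theorem pvFoldl_len (xs : List String) (init : Int) :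
    xs.foldl (fun res node_name => res + get_node_len node_name) init = init + xs.length := by
  induction xs generalizing init with
  | nil => simp
  | cons x t ih =>
    rw [List.foldl_cons, ih]
    simp [get_node_len, pvMODE]
    ring

-- ===== VERDICT (by name: the statement is the Claim_ definition above) =====
theorem compute_length_spec : Claim_equal_compute_length := by
  intro chain _
  unfold Spec_compute_length compute_length compute_length_alt
  by_cases h : chain = ""
  · simp [h]
  · simp only [h, if_false]
    have hsplit : PySem.Str.split? chain " " =
        some ((PySem.Chars.splitOn chain.toList [' ']).map String.ofList) := by
      simp [PySem.Str.split?, PySem.Chars.split?]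
    rw [hsplit]
    simp only [Option.getD_some]
    rw [pvFoldl_len]
    have hlen : (PySem.Chars.splitOn chain.toList [' ']).length =
        1 + pvCnt chain.toList := by
      unfold PySem.Chars.splitOn
      rw [pvSplit_go_len chain.toList (chain.toList.length + 1) [] [] (by omega)]
      simp
    have hcount : PySem.Str.count chain " " = pvCnt chain.toList := by
      simp [PySem.Str.count, PySem.Chars.count]
      rw [pvCount_go_eq chain.toList chain.length 0 (by simp)]
      omega
    rw [hcount]
    simp [hlen]
    ring
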